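-- pv_equiv track=rewrite | github.com/yury-fedorov/AoC | AoC24/python/day22.py | _price_change
-- ===== SOURCE A (Python) =====
-- from math import floor
-- from typing import NamedTuple, Counter
--
-- def _mix(secret, value: int) -> int: return secret ^ value
--
-- def _prune(secret: int) -> int: return secret % 16777216
--
-- def _next(secret: int) -> int:
--     secret = _prune(_mix(secret, secret * 64))
--     secret = _prune(_mix(secret, floor(secret / 32)))
--     return _prune(_mix(secret, secret * 2048))
--
-- def _price(secret: int) -> int: return secret % 10
--
-- class PriceChange(NamedTuple):
--     price: int
--     change: int
--
-- def _price_change(secret, n: int) -> [PriceChange]: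
--     previous = _price(secret)
--     result = []
--     for _ in range(n):
--         secret = _next(secret)
--         price = _price(secret)
--         result.append(PriceChange(price, price - previous))
--         previous = price
--     return result
-- ===== SOURCE B (Python) =====
-- # B: divide-and-conquer — recursively split the n steps in half; each call returns
-- # (secret after k steps, the k PriceChange pairs), halves concatenated. No loop,
-- # no running 'previous' accumulator (the previous price is recomputed from the
-- # segment's starting secret).
-- from math import floor
-- from typing import NamedTuple
--
-- class PriceChange(NamedTuple):
--     price: int
--     change: int
--
-- def _step(secret):
--     secret = (secret ^ (secret * 64)) % 16777216
--     secret = (secret ^ floor(secret / 32)) % 16777216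
--     return (secret ^ (secret * 2048)) % 16777216
--
-- def _price_change(secret, n):
--     def go(s, k):
--         # (secret after k steps from s, PriceChange list for those k steps)
--         if k <= 0:
--             return s, []
--         if k == 1:
--             t = _step(s)
--             p = t % 10
--             return t, [PriceChange(p, p - s % 10)]
--         h = k // 2
--         m, left = go(s, h)
--         e, right = go(m, k - h)
--         return e, left + right
--     return go(secret, n)[1]
-- ===== Notes on version B (the rewrite author's own statement) =====
-- stated objective: alternative
-- what changed: B replaces A's linear loop with a running 'previous' price by a divide-and-conquer recursion: each call splits the k steps in half, returns (final secret, pair list) for its segment, and concatenates the halves, deriving each segment's previous price from its starting secret instead of threading an accumulator.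
import Mathlib
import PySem

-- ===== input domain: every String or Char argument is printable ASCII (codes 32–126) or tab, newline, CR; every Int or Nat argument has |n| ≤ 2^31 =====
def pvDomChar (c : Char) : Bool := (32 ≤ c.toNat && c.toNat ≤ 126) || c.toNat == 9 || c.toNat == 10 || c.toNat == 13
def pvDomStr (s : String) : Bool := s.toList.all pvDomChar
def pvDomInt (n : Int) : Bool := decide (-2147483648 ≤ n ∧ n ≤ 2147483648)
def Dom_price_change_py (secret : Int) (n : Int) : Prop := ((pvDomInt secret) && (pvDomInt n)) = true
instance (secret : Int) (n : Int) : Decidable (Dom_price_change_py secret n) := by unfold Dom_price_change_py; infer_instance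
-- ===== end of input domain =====

-- B replaces A's linear loop (running 'previous' accumulator) by a divide-and-conquer
-- recursion that splits the n steps in half and concatenates the halves (alternative).

-- ===== PORT A =====
-- _next: floor(secret / 32) uses float division in Python, but its operand is already
-- pruned to [0, 2^24), where the float quotient is exact, so it equals floor division.
def pcNextA (secret : Int) : Int :=
  let s1 := PySem.Int.mod (PySem.Int.bxor secret (secret * 64)) 16777216
  let s2 := PySem.Int.mod (PySem.Int.bxor s1 (PySem.Int.floordiv s1 32)) 16777216
  PySem.Int.mod (PySem.Int.bxor s2 (s2 * 2048)) 16777216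

def price_change_py (secret : Int) (n : Int) : List (Int × Int) :=
  let previous := PySem.Int.mod secret 10
  let st := (PySem.List.pyRange 0 n 1).foldl
    (fun (st : Int × Int × List (Int × Int)) _ =>
      let s := pcNextA st.1
      let price := PySem.Int.mod s 10
      (s, price, st.2.2 ++ [(price, price - st.2.1)]))
    (secret, previous, [])
  st.2.2

-- ===== PORT B =====
-- Source B's _step is the same three-step update formula; pcNextA transliterates it
-- (the float-division remark above applies verbatim).
-- go: (secret after k steps, PriceChange list for those k steps), splitting k in half.
-- Structural recursion on a fuel bound (fuel ≥ k.toNat suffices; it only makes the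
-- recursion total and never changes the computed value on the reachable calls).
def pcGoAux (fuel : Nat) (s : Int) (k : Int) : Int × List (Int × Int) :=
  match fuel with
  | 0 => (s, [])
  | fuel + 1 =>
    if k ≤ 0 then (s, [])
    else if k = 1 then
      let t := pcNextA s
      let p := PySem.Int.mod t 10
      (t, [(p, p - PySem.Int.mod s 10)])
    else
      let h := PySem.Int.floordiv k 2
      let l := pcGoAux fuel s h
      let r := pcGoAux fuel l.1 (k - h)
      (r.1, l.2 ++ r.2)

def price_change_py_alt (secret : Int) (n : Int) : List (Int × Int) :=
  (pcGoAux (n.toNat + 1) secret n).2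

-- ===== PRECONDITION & SPEC =====
def Spec_price_change_py (secret : Int) (n : Int) (out : List (Int × Int)) : Prop := out = price_change_py_alt secret n
instance (secret : Int) (n : Int) (out : List (Int × Int)) : Decidable (Spec_price_change_py secret n out) := by unfold Spec_price_change_py; infer_instance

-- ===== CLAIM (what is proved, stated in full; the proofs are below) =====
def Claim_equal_price_change_py : Prop := ∀ (secret : Int) (n : Int), Dom_price_change_py secret n → Spec_price_change_py secret n (price_change_py secret n)

-- ===== LEMMAS AND PROOFS =====
-- change list: the sequence of (price, change) pairs produced after k steps from secret
def pcChgs (secret : Int) : Nat → List (Int × Int)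
  | 0 => []
  | k+1 =>
    let s := pcNextA secret
    (PySem.Int.mod s 10, PySem.Int.mod s 10 - PySem.Int.mod secret 10) :: pcChgs s k

theorem pcFoldA (l : List Int) (s : Int) (acc : List (Int × Int)) :
    l.foldl (fun (st : Int × Int × List (Int × Int)) _ =>
      let t := pcNextA st.1
      let price := PySem.Int.mod t 10
      (t, price, st.2.2 ++ [(price, price - st.2.1)]))
      (s, PySem.Int.mod s 10, acc)
    = (Nat.iterate pcNextA l.length s,
       PySem.Int.mod (Nat.iterate pcNextA l.length s) 10,
       acc ++ pcChgs s l.length) := by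
  induction l generalizing s acc with
  | nil => simp [pcChgs]
  | cons x xs ih =>
    simp only [List.foldl_cons, List.length_cons, pcChgs]
    rw [ih (pcNextA s)]
    simp [Function.iterate_succ_apply]

theorem pcChgs_append (a b : Nat) (s : Int) :
    pcChgs s (a + b) = pcChgs s a ++ pcChgs (Nat.iterate pcNextA a s) b := by
  induction a generalizing s with
  | zero => simp [pcChgs]
  | succ a ih =>
    have : a + 1 + b = (a + b) + 1 := by omega
    rw [this]
    simp only [pcChgs]
    rw [ih (pcNextA s)]
    simp [Function.iterate_succ_apply]

theorem pcGo_eq (fuel : Nat) (s k : Int) (hk : k.toNat ≤ fuel) :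
    pcGoAux fuel s k = (Nat.iterate pcNextA k.toNat s, pcChgs s k.toNat) := by
  induction fuel generalizing s k with
  | zero =>
    have h0 : k.toNat = 0 := by omega
    simp [pcGoAux, h0, pcChgs]
  | succ fuel ih =>
    rw [pcGoAux]
    split_ifs with h0 h1
    · have : k.toNat = 0 := by omega
      simp [this, pcChgs]
    · subst h1
      simp only [Int.toNat_one, pcChgs]
      rfl
    · have hfd : PySem.Int.floordiv k 2 = k / 2 := by
        simp [PySem.Int.floordiv, Int.fdiv_eq_ediv]
      have hb : 1 ≤ PySem.Int.floordiv k 2 ∧ PySem.Int.floordiv k 2 < k := by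
        rw [hfd]; omega
      have hsum : (PySem.Int.floordiv k 2).toNat + (k - PySem.Int.floordiv k 2).toNat = k.toNat := by
        rw [hfd]; omega
      show ((pcGoAux fuel (pcGoAux fuel s (PySem.Int.floordiv k 2)).1 (k - PySem.Int.floordiv k 2)).1,
            (pcGoAux fuel s (PySem.Int.floordiv k 2)).2 ++
            (pcGoAux fuel (pcGoAux fuel s (PySem.Int.floordiv k 2)).1 (k - PySem.Int.floordiv k 2)).2)
          = (pcNextA^[k.toNat] s, pcChgs s k.toNat)
      rw [ih s (PySem.Int.floordiv k 2) (by omega)]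
      rw [ih _ (k - PySem.Int.floordiv k 2) (by omega)]
      refine Prod.ext ?_ ?_
      · show pcNextA^[(k - PySem.Int.floordiv k 2).toNat] (pcNextA^[(PySem.Int.floordiv k 2).toNat] s) = pcNextA^[k.toNat] s
        rw [← Function.iterate_add_apply, Nat.add_comm, hsum]
      · show pcChgs s (PySem.Int.floordiv k 2).toNat ++ pcChgs (pcNextA^[(PySem.Int.floordiv k 2).toNat] s) (k - PySem.Int.floordiv k 2).toNat = pcChgs s k.toNat
        rw [← pcChgs_append, hsum]

theorem price_change_py_spec : Claim_equal_price_change_py := by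
  intro secret n _
  unfold Spec_price_change_py price_change_py price_change_py_alt
  dsimp only
  rw [pcFoldA _ secret [], pcGo_eq _ _ _ (by omega)]
  simp [PySem.List.length_pyRange_one]
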